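-- pv_equiv track=rewrite | github.com/nguyenLong1911/Lab14-AI-Evaluation-Benchmarking | engine/retrieval_eval.py | calculate_first_hit_rank
-- ===== SOURCE A (Python) =====
-- from typing import Dict, List, Optional, Tuple
--
-- def calculate_first_hit_rank(
--
--     expected_ids: List[str],
--     retrieved_ids: List[str],
-- ) -> Optional[int]:
--     """1-indexed rank of the first relevant chunk, or ``None`` if missed."""
--
--     if not expected_ids:
--         return None
--     expected_set = set(expected_ids)
--     for i, doc_id in enumerate(retrieved_ids):
--         if doc_id in expected_set:
--             return i + 1
--     return None
-- ===== SOURCE B (Python) =====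
-- def calculate_first_hit_rank(expected_ids, retrieved_ids):
--     """1-indexed rank of the first relevant chunk, or None if missed."""
--     pos = {}
--     for i, doc_id in enumerate(retrieved_ids):
--         if doc_id not in pos:
--             pos[doc_id] = i
--     found = [pos[e] for e in expected_ids if e in pos]
--     if not found:
--         return None
--     return min(found) + 1
-- ===== Notes on version B (the rewrite author's own statement) =====
-- stated objective: alternative
-- what changed: B indexes retrieved_ids once into a dict of earliest positions and scans expected_ids taking the minimum position, instead of A's scan of retrieved_ids with a membership test against a set of expected_ids.
import Mathlib
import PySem

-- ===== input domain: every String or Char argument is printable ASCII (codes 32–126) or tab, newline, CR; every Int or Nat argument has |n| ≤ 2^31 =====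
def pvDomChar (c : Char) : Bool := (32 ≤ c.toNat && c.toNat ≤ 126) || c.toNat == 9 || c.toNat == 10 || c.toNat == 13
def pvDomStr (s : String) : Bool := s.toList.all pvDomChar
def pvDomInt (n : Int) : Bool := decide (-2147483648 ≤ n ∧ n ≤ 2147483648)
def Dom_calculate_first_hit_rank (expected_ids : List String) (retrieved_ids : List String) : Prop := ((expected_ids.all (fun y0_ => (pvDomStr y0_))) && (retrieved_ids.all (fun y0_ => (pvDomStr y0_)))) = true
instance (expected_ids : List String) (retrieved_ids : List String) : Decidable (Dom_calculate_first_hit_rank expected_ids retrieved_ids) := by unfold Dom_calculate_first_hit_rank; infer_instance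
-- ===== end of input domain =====

-- B replaces A's scan of retrieved_ids (membership test against set(expected_ids)) by a dict of
-- earliest positions built from retrieved_ids, then a min over the expected side (objective: alternative).

-- ===== PORT A =====
-- the for-loop with its early return
def pvLoopA (expected_set : PySem.Set String) : List (Int × String) → Option Int
  | [] => none
  | (i, doc_id) :: rest =>
      if PySem.Set.contains expected_set doc_id then some (i + 1)
      else pvLoopA expected_set rest

def calculate_first_hit_rank (expected_ids : List String) (retrieved_ids : List String) : Option Int :=
  if expected_ids = [] then none
  else pvLoopA (PySem.Set.ofList expected_ids) (PySem.List.enumerate retrieved_ids)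

-- ===== PORT B =====
def calculate_first_hit_rank_alt (expected_ids : List String) (retrieved_ids : List String) : Option Int :=
  let pos : PySem.Dict String Int :=
    (PySem.List.enumerate retrieved_ids).foldl
      (fun d p => if d.contains p.2 then d else d.insert p.2 p.1) PySem.Dict.empty
  let found : List Int := expected_ids.filterMap (fun e => pos.get? e)
  match PySem.List.min? found (fun x => x) with
  | none => none
  | some m => some (m + 1)

-- ===== PRECONDITION & SPEC =====
def Spec_calculate_first_hit_rank (expected_ids : List String) (retrieved_ids : List String) (out : Option Int) : Prop := out = calculate_first_hit_rank_alt expected_ids retrieved_ids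
instance (expected_ids : List String) (retrieved_ids : List String) (out : Option Int) : Decidable (Spec_calculate_first_hit_rank expected_ids retrieved_ids out) := by unfold Spec_calculate_first_hit_rank; infer_instance

-- ===== CLAIM (what is proved, stated in full; the proofs are below) =====
def Claim_equal_calculate_first_hit_rank : Prop := ∀ (expected_ids : List String) (retrieved_ids : List String), Dom_calculate_first_hit_rank expected_ids retrieved_ids → Spec_calculate_first_hit_rank expected_ids retrieved_ids (calculate_first_hit_rank expected_ids retrieved_ids)

-- ===== LEMMAS AND PROOFS =====

-- proof-side: first index of v in xs
def pvFIdx (v : String) : List String → Option Nat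
  | [] => none
  | x :: t => if x = v then some 0 else (pvFIdx v t).map (· + 1)

-- proof-side: first index whose element lies in es
def pvG (es : List String) : List String → Option Nat
  | [] => none
  | x :: t => if x ∈ es then some 0 else (pvG es t).map (· + 1)

theorem pvLoopA_eq (es : List String) (xs : List String) (k : Int) :
    pvLoopA (PySem.Set.ofList es) (PySem.List.enumerate xs k)
      = (pvG es xs).map (fun j => (k + j) + 1) := by
  induction xs generalizing k with
  | nil => simp [PySem.List.enumerate_nil, pvLoopA, pvG]
  | cons x t ih =>
      rw [PySem.List.enumerate_cons]
      by_cases hx : x ∈ es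
      · simp [pvLoopA, pvG, hx]
      · have : PySem.Set.contains (PySem.Set.ofList es) x = false := by
          rw [Bool.eq_false_iff]
          intro h
          exact hx ((PySem.Set.mem_ofList es x).mp ((PySem.Set.contains_iff (PySem.Set.ofList es) x).mp h))
        simp only [pvLoopA, this, Bool.false_eq_true, if_false, ih (k + 1), pvG, hx]
        cases pvG es t <;> (simp; try ring)

theorem pvDict_get (xs : List String) (k : Int) (d : PySem.Dict String Int) (e : String) :
    ((PySem.List.enumerate xs k).foldl
        (fun d p => if d.contains p.2 then d else d.insert p.2 p.1) d).get? e
      = if d.contains e then d.get? e else (pvFIdx e xs).map (fun j => k + j) := by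
  induction xs generalizing k d with
  | nil =>
      by_cases hc : d.contains e
      · simp [PySem.List.enumerate_nil, hc]
      · rw [Bool.not_eq_true] at hc
        simp [PySem.List.enumerate_nil, hc, pvFIdx, PySem.Dict.get?_eq_none_iff_contains]
  | cons x t ih =>
      rw [PySem.List.enumerate_cons, List.foldl_cons]
      by_cases hcx : d.contains x
      · simp only [hcx, if_true]
        rw [ih]
        by_cases hce : d.contains e
        · simp [hce]
        · have hne : x ≠ e := fun h => hce (h ▸ hcx)
          simp [hce, pvFIdx, hne]
          cases pvFIdx e t <;> (simp; try ring)
      · rw [Bool.not_eq_true] at hcx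
        simp only [hcx, Bool.false_eq_true, if_false]
        rw [ih]
        by_cases hex : e = x
        · subst hex
          have h1 : (d.insert e k).contains e = true := PySem.Dict.contains_insert_self d e k
          simp [h1, PySem.Dict.get?_insert_self, pvFIdx, hcx]
        · have h1 : (d.insert x k).contains e = d.contains e := by
            rw [PySem.Dict.contains_insert]
            simp [hex]
          have h2 : (d.insert x k).get? e = d.get? e :=
            PySem.Dict.get?_insert_of_ne d k hex
          rw [h1, h2]
          by_cases hce : d.contains e
          · simp [hce]
          · have hne : x ≠ e := fun h => hex h.symm
            simp [hce, pvFIdx, hne]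
            cases pvFIdx e t <;> (simp; try ring)

theorem pvMin_eq (es : List String) (xs : List String) (k : Int) :
    PySem.List.min? (es.filterMap (fun e => (pvFIdx e xs).map (fun j => k + j))) (fun x => x)
      = (pvG es xs).map (fun j => k + j) := by
  induction xs generalizing k with
  | nil =>
      simp [pvFIdx, pvG]
  | cons x t ih =>
      by_cases hx : x ∈ es
      · -- the list contains k and every element is ≥ k, so the min is k
        set L := es.filterMap (fun e => (pvFIdx e (x :: t)).map (fun j => k + j)) with hL
        have hkL : k ∈ L := by
          rw [hL, List.mem_filterMap]
          exact ⟨x, hx, by simp [pvFIdx]⟩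
        have hall : ∀ y ∈ L, k ≤ y := by
          intro y hy
          rw [hL, List.mem_filterMap] at hy
          obtain ⟨e, _, he⟩ := hy
          by_cases hex : x = e
          · simp [pvFIdx, hex] at he; omega
          · simp only [pvFIdx, hex, if_false] at he
            cases hf : pvFIdx e t with
            | none => rw [hf] at he; simp at he
            | some j =>
                rw [hf] at he
                simp at he
                omega
        have hne : L ≠ [] := fun h => by simp [h] at hkL
        cases hmin : PySem.List.min? L (fun x => x) with
        | none => exact absurd ((PySem.List.min?_eq_none_iff L (fun x => x)).mp hmin) hne
        | some m =>
            have hm1 : m ∈ L := PySem.List.min?_mem hmin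
            have hm2 : m ≤ k := PySem.List.min?_isMin hmin k hkL
            have hm3 : k ≤ m := hall m hm1
            have : m = k := le_antisymm hm2 hm3
            simp [pvG, hx, this]
      · have hcongr : es.filterMap (fun e => (pvFIdx e (x :: t)).map (fun j => k + j))
            = es.filterMap (fun e => (pvFIdx e t).map (fun j => (k + 1) + j)) := by
          apply List.filterMap_congr
          intro e he
          have hne : x ≠ e := fun h => hx (h ▸ he)
          simp only [pvFIdx, hne, if_false]
          cases pvFIdx e t <;> (simp; try ring)
        rw [hcongr, ih (k + 1)]
        simp only [pvG, hx, if_false]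
        cases pvG es t <;> (simp; try ring)

theorem pvG_nil (xs : List String) : pvG [] xs = none := by
  induction xs with
  | nil => rfl
  | cons x t ih => simp [pvG, ih]

-- ===== VERDICT (by name: the statement is the Claim_ definition above) =====
theorem calculate_first_hit_rank_spec : Claim_equal_calculate_first_hit_rank := by
  intro es rs _
  unfold Spec_calculate_first_hit_rank calculate_first_hit_rank calculate_first_hit_rank_alt
  have hget : ∀ e, (((PySem.List.enumerate rs 0).foldl
      (fun d p => if d.contains p.2 then d else d.insert p.2 p.1) PySem.Dict.empty).get? e)
      = (pvFIdx e rs).map (fun j => (0 : Int) + j) := by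
    intro e
    rw [pvDict_get]
    simp [PySem.Dict.contains_empty]
  simp only [hget]
  rw [pvMin_eq es rs 0]
  by_cases hes : es = []
  · subst hes
    simp [pvG_nil rs]
  · simp only [hes, if_false]
    rw [pvLoopA_eq es rs 0]
    cases pvG es rs <;> simp
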